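-- pv_equiv track=rewrite | github.com/jyscao/advent-of-code-solutions | 2023/22-sand-slabs.py | find_drop_amount
-- ===== SOURCE A (Python) =====
-- def find_drop_amount(vertical_slice):
--     drop_amount = 0
--     for layer in vertical_slice[::-1]:
--         if all(all(x == "" for x in y) for y in layer):
--             drop_amount += 1
--         else:
--             break
--     return drop_amount
-- ===== SOURCE B (Python) =====
-- def find_drop_amount(vertical_slice):
--     nonempty = [i for i, layer in enumerate(vertical_slice)
--                 if any(x != "" for y in layer for x in y)]
--     if not nonempty:
--         return len(vertical_slice)
--     return len(vertical_slice) - (nonempty[-1] + 1)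
-- ===== Notes on version B (the rewrite author's own statement) =====
-- stated objective: alternative
-- what changed: Replaces A's reversed early-break counting loop by building the list of indices of non-empty layers (a filtered enumerate with an any-based emptiness test instead of A's all-based one) and deriving the trailing-empty count arithmetically from the last such index.
import Mathlib
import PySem

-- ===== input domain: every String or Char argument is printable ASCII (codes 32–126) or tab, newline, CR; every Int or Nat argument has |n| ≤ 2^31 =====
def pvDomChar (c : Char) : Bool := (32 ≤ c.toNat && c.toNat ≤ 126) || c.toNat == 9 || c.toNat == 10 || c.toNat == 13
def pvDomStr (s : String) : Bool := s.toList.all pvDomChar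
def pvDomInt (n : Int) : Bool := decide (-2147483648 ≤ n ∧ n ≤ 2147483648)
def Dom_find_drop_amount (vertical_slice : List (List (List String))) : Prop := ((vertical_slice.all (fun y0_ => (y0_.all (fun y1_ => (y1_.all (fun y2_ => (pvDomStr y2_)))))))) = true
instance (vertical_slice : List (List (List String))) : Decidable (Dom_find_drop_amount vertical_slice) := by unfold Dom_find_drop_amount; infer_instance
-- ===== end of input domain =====

-- B replaces A's reversed early-break counting loop by collecting the indices of
-- non-empty layers (any-based test) and deriving the trailing count from the last index;
-- alternative decomposition, same cost.

-- ===== PORT A =====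
-- all(all(x == "" for x in y) for y in layer)
def pvAllEmpty (layer : List (List String)) : Bool :=
  layer.all (fun y => y.all (fun x => x == ""))

-- A's for-loop with break: structural recursion over the reversed list
def pvLoopA (drop_amount : Int) : List (List (List String)) → Int
  | [] => drop_amount
  | layer :: rest =>
      if pvAllEmpty layer then pvLoopA (drop_amount + 1) rest else drop_amount

def find_drop_amount (vertical_slice : List (List (List String))) : Int :=
  -- vertical_slice[::-1]; slice? with step -1 always returns some
  pvLoopA 0 ((PySem.List.slice? vertical_slice none none (-1)).getD [])

-- ===== PORT B =====
-- the list comprehension: indices i whose layer satisfies any(x != "" for y in layer for x in y)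
def pvNonemptyIdx (vertical_slice : List (List (List String))) : List Int :=
  ((PySem.List.enumerate vertical_slice 0).filter
      (fun p => p.2.any (fun y => y.any (fun x => x != "")))).map Prod.fst

def find_drop_amount_alt (vertical_slice : List (List (List String))) : Int :=
  match (pvNonemptyIdx vertical_slice).getLast? with
  | none => (vertical_slice.length : Int)
  | some i => (vertical_slice.length : Int) - (i + 1)

-- ===== PRECONDITION & SPEC =====
def Spec_find_drop_amount (vertical_slice : List (List (List String))) (out : Int) : Prop := out = find_drop_amount_alt vertical_slice
instance (vertical_slice : List (List (List String))) (out : Int) : Decidable (Spec_find_drop_amount vertical_slice out) := by unfold Spec_find_drop_amount; infer_instance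

-- ===== CLAIM (what is proved, stated in full; the proofs are below) =====
def Claim_equal_find_drop_amount : Prop := ∀ (vertical_slice : List (List (List String))), Dom_find_drop_amount vertical_slice → Spec_find_drop_amount vertical_slice (find_drop_amount vertical_slice)

-- ===== LEMMAS AND PROOFS =====

theorem pvAny_eq_not_allEmpty (layer : List (List String)) :
    (layer.any (fun y => y.any (fun x => x != ""))) = !(pvAllEmpty layer) := by
  simp [pvAllEmpty, List.any_eq_not_all_not, bne]

theorem pvLoopA_acc (l : List (List (List String))) (d : Int) :
    pvLoopA d l = d + pvLoopA 0 l := by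
  induction l generalizing d with
  | nil => simp [pvLoopA]
  | cons h t ih =>
      by_cases hh : pvAllEmpty h
      · simp only [pvLoopA, hh, if_true]
        rw [ih]
        conv_rhs => rw [ih]
        omega
      · simp [pvLoopA, hh]

theorem pvNonemptyIdx_append (l : List (List (List String))) (a : List (List String)) :
    pvNonemptyIdx (l ++ [a]) =
      pvNonemptyIdx l ++ (if !(pvAllEmpty a) then [(l.length : Int)] else []) := by
  unfold pvNonemptyIdx
  rw [PySem.List.enumerate_append, List.filter_append, List.map_append]
  congr 1
  by_cases ha : pvAllEmpty a <;>
    simp [PySem.List.enumerate, pvAny_eq_not_allEmpty, ha]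

theorem pv_main (l : List (List (List String))) :
    find_drop_amount_alt l = pvLoopA 0 l.reverse := by
  induction l using List.reverseRecOn with
  | nil => rfl
  | append_singleton l a ih =>
      unfold find_drop_amount_alt at ih ⊢
      rw [pvNonemptyIdx_append, List.reverse_append]
      by_cases ha : pvAllEmpty a
      · simp only [Bool.not_true, Bool.false_eq_true, if_false, List.append_nil,
          List.reverse_singleton, List.singleton_append, pvLoopA, ha, if_true,
          List.length_append, List.length_singleton]
        rw [pvLoopA_acc]
        cases h : (pvNonemptyIdx l).getLast? <;>
          · simp only [h] at ih ⊢
            push_cast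
            omega
      · simp only [ha, Bool.not_false, if_true, List.getLast?_append,
          List.getLast?_singleton, Option.some_or, List.reverse_singleton,
          List.singleton_append, pvLoopA, Bool.false_eq_true, if_false,
          List.length_append, List.length_singleton]
        push_cast
        omega

-- ===== VERDICT (by name: the statement is the Claim_ definition above) =====
theorem find_drop_amount_spec : Claim_equal_find_drop_amount := by
  intro vs _
  unfold Spec_find_drop_amount find_drop_amount
  rw [PySem.List.slice?_none_none_neg_one]
  exact (pv_main vs).symm
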